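-- pv_equiv track=rewrite | github.com/1DeepAI/Chanakya | PP321to330.py | is_magic_square_number
-- ===== SOURCE A (Python) =====
-- def is_magic_square_number(num):
--     # A magic square number is a number that is the sum of all the elements in a 3x3 magic square.
--     # A 3x3 magic square is a square matrix with unique positive integers such that each row, column, and diagonal
--     # has the same sum.
--     # Here, we can check if a number is a magic square number by brute force approach.
--
--     def is_magic_square(matrix):
--         target_sum = sum(matrix[0])
--
--         # Check rows
--         for row in matrix:
--             if sum(row) != target_sum:
--                 return False
--
--         # Check columns
--         for col in range(3):
--             if sum(matrix[row][col] for row in range(3)) != target_sum: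
--                 return False
--
--         # Check diagonals
--         if sum(matrix[i][i] for i in range(3)) != target_sum or sum(matrix[i][2 - i] for i in range(3)) != target_sum:
--             return False
--
--         return True
--
--     for a in range(1, num // 2 + 1):
--         for b in range(a + 1, num - a):
--             c = num - a - b
--             matrix = [[a, b, c], [b, c, a], [c, a, b]]
--             if is_magic_square(matrix):
--                 return True
--
--     return False
-- ===== SOURCE B (Python) =====
-- def is_magic_square_number(num):
--     # A circulant matrix [[a,b,c],[b,c,a],[c,a,b]] has all rows, columns and the
--     # main diagonal summing to a+b+c = num; the anti-diagonal sums to 3c, so the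
--     # square is magic iff 3c = num, i.e. num is divisible by 3 with c = num // 3.
--     # A pair (a, b) with 1 <= a <= num//2, a+1 <= b <= num-a-1 and num-a-b = c
--     # exists exactly when num >= 6.  Hence the closed form:
--     return num >= 6 and num % 3 == 0
-- ===== Notes on version B (the rewrite author's own statement) =====
-- stated objective: faster
-- what changed: Replaced the O(num^2) brute-force search over circulant 3x3 matrices by the closed-form arithmetic test num >= 6 and num % 3 == 0, derived from the fact that such a matrix is magic iff its anti-diagonal 3c equals num.
import Mathlib
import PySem

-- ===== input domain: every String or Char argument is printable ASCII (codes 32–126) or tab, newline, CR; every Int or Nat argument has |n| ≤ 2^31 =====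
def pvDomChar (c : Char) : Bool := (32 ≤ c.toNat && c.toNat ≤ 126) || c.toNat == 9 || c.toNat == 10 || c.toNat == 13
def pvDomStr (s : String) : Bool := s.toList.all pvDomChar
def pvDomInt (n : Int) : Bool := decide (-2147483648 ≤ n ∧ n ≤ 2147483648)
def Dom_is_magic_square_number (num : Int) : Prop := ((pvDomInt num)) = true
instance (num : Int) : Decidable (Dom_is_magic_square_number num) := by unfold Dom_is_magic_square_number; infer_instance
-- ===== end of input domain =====

-- B replaces A's O(num^2) brute-force search over circulant 3x3 matrices by a closed-form
-- O(1) arithmetic test (objective: faster, asymptotic).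

-- ===== PORT A =====
-- Python's sum(row) over a list of ints
def pySum (xs : List Int) : Int := xs.foldl (· + ·) 0

-- inner helper is_magic_square; matrix[i][j] ported with pyGetD (exact here: the caller
-- only ever passes 3x3 matrices, so every index is in range and no IndexError can occur)
def is_magic_square (matrix : List (List Int)) : Bool :=
  let target_sum := pySum (PySem.List.pyGetD matrix 0 [])
  -- check rows (the for-loop with early `return False`)
  if ¬ (matrix.all (fun row => pySum row == target_sum)) then false
  -- check columns
  else if ¬ ((PySem.List.pyRange 0 3 1).all (fun col =>
      pySum ((PySem.List.pyRange 0 3 1).map (fun row =>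
        PySem.List.pyGetD (PySem.List.pyGetD matrix row []) col 0)) == target_sum)) then false
  -- check diagonals
  else if pySum ((PySem.List.pyRange 0 3 1).map (fun i =>
          PySem.List.pyGetD (PySem.List.pyGetD matrix i []) i 0)) != target_sum
       || pySum ((PySem.List.pyRange 0 3 1).map (fun i =>
          PySem.List.pyGetD (PySem.List.pyGetD matrix i []) (2 - i) 0)) != target_sum then false
  else true

def is_magic_square_number (num : Int) : Bool :=
  (PySem.List.pyRange 1 (PySem.Int.floordiv num 2 + 1) 1).any (fun a =>
    (PySem.List.pyRange (a + 1) (num - a) 1).any (fun b =>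
      let c := num - a - b
      is_magic_square [[a, b, c], [b, c, a], [c, a, b]]))

-- ===== PORT B =====
def is_magic_square_number_alt (num : Int) : Bool :=
  decide (6 ≤ num) && (PySem.Int.mod num 3 == 0)

-- ===== PRECONDITION & SPEC =====
def Spec_is_magic_square_number (num : Int) (out : Bool) : Prop := out = is_magic_square_number_alt num
instance (num : Int) (out : Bool) : Decidable (Spec_is_magic_square_number num out) := by unfold Spec_is_magic_square_number; infer_instance

-- ===== CLAIM (what is proved, stated in full; the proofs are below) =====
def Claim_equal_is_magic_square_number : Prop := ∀ (num : Int), Dom_is_magic_square_number num → Spec_is_magic_square_number num (is_magic_square_number num)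

-- ===== LEMMAS AND PROOFS =====

-- the circulant matrix A builds is magic exactly when its anti-diagonal 3c matches a+b+c
theorem is_magic_square_circulant (a b c : Int) :
    is_magic_square [[a, b, c], [b, c, a], [c, a, b]] = true ↔ a + b = 2 * c := by
  have h3 : PySem.List.pyRange 0 3 1 = [0, 1, 2] := by decide
  simp [is_magic_square, pySum, h3, PySem.List.pyGetD, PySem.List.pyGet?, PySem.List.pyIdx?]
  omega

theorem is_magic_square_number_true_iff (num : Int) :
    is_magic_square_number num = true ↔ 6 ≤ num ∧ num % 3 = 0 := by
  have hfd : PySem.Int.floordiv num 2 = num / 2 := PySem.Int.floordiv_eq_ediv_of_pos (by norm_num)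
  simp only [is_magic_square_number, List.any_eq_true, PySem.List.mem_pyRange_one, hfd]
  constructor
  · rintro ⟨a, ha, b, hb, hm⟩
    rw [is_magic_square_circulant] at hm
    omega
  · rintro ⟨h6, h3⟩
    refine ⟨1, by omega, 2 * (num / 3) - 1, by omega, ?_⟩
    rw [is_magic_square_circulant]
    omega

theorem alt_true_iff (num : Int) :
    is_magic_square_number_alt num = true ↔ 6 ≤ num ∧ num % 3 = 0 := by
  simp [is_magic_square_number_alt]

-- ===== VERDICT (by name: the statement is the Claim_ definition above) =====
theorem is_magic_square_number_spec : Claim_equal_is_magic_square_number := by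
  intro num _
  unfold Spec_is_magic_square_number
  rw [Bool.eq_iff_iff, is_magic_square_number_true_iff, alt_true_iff]
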